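-- pv_equiv track=rewrite | github.com/microsoft/ML-For-Beginners | .venv/Lib/site-packages/statsmodels/tsa/vector_ar/tests/JMulTi_results/parse_jmulti_vecm_output.py | sublists
-- ===== SOURCE A (Python) =====
-- import itertools
--
-- def sublists(lst, min_elmts=0, max_elmts=None):
--     """Build a list of all possible sublists of a given list. Restrictions
--     on the length of the sublists can be posed via the min_elmts and max_elmts
--     parameters.
--     All sublists
--     have will have at least min_elmts elements and not more than max_elmts
--     elements.
--
--     Parameters
--     ----------
--     lst : list
--         Original list from which sublists are generated.
--     min_elmts : int
--         Lower bound for the length of sublists.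
--     max_elmts : int or None
--         If int, then max_elmts are the upper bound for the length of sublists.
--         If None, sublists' length is not restricted. In this case the longest
--         sublist will be of the same length as the original list lst.
--
--     Returns
--     -------
--     result : list
--         A list of all sublists of lst fulfilling the length restrictions.
--     """
--     if max_elmts is None:
--         max_elmts = len(lst)
--     # for the following see also the definition of powerset() in
--     # https://docs.python.org/dev/library/itertools.html#itertools-recipes
--     result = itertools.chain.from_iterable(
--                 itertools.combinations(lst, sublist_len)
--                 for sublist_len in range(min_elmts, max_elmts+1))
--     if type(result) != list:
--         result = list(result)
--     return result
-- ===== SOURCE B (Python) =====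
-- def sublists(lst, min_elmts=0, max_elmts=None):
--     n = len(lst)
--     if max_elmts is None:
--         max_elmts = n
--     result = []
--     for k in range(min_elmts, max_elmts + 1):
--         # grow length-k sublists breadth-first: each state is (prefix, next start index)
--         level = [((), 0)]
--         for r in range(k, 0, -1):  # r = elements still to pick
--             if not level:
--                 break
--             level = [(p + (lst[i],), i + 1)
--                      for (p, s) in level
--                      for i in range(s, n - r + 1)]
--         result.extend(p for (p, s) in level)
--     return result
-- ===== Notes on version B (the rewrite author's own statement) =====
-- stated objective: alternative
-- what changed: Replaces the per-length itertools.combinations chain with a hand-written breadth-first generator: for each k it grows (prefix, next-index) states level by level, picking one element per level, which yields the same index-lexicographic tuples without itertools.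
import Mathlib
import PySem

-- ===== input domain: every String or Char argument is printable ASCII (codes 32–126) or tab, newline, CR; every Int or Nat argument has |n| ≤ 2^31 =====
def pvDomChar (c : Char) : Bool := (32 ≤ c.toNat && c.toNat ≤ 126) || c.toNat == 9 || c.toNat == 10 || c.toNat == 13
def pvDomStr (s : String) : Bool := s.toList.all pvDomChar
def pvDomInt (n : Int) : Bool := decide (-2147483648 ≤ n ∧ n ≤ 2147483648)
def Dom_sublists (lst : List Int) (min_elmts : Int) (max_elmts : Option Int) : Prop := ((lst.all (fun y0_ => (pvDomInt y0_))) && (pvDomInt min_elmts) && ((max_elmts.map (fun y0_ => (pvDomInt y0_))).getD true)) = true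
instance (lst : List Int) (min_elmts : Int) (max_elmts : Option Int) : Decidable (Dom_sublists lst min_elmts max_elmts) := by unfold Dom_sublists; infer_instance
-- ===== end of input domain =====

-- B drops itertools and grows each length-k sublist breadth-first from (prefix, next-index)
-- states, level by level (objective: alternative; return value only, no mutation).

-- ===== PORT A =====
-- hand port of itertools.combinations lst r (exact: same index-lexicographic order of r-tuples)
def pvCombinations (lst : List Int) (r : Nat) : List (List Int) :=
  match lst, r with
  | _, 0 => [[]]
  | [], _ + 1 => []
  | x :: xs, k + 1 => (pvCombinations xs k).map (x :: ·) ++ pvCombinations xs (k + 1)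

def sublists (lst : List Int) (min_elmts : Int) (max_elmts : Option Int) : List (List Int) :=
  let mx : Int := max_elmts.getD (lst.length : Int)
  -- Python raises ValueError for a negative sublist_len; Pre_ excludes those inputs,
  -- so '.toNat' is only evaluated on nonnegative k inside Pre_.
  (PySem.List.pyRange min_elmts (mx + 1) 1).flatMap (fun k => pvCombinations lst k.toNat)

-- ===== PORT B =====
-- one pass of the inner loop of Source B: expand every (prefix, start) state by one picked element
-- (lst[i] is always a valid nonnegative index on the paths reached from sublists_alt: 0 ≤ i and
-- i < len(lst) - r + 1 with r ≥ 1, so '.getD 0' never supplies its default there)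
def pvLevelStep (lst : List Int) (level : List (List Int × Int)) (r : Int) : List (List Int × Int) :=
  level.flatMap (fun ps =>
    (PySem.List.pyRange ps.2 ((lst.length : Int) - r + 1) 1).map
      (fun i => (ps.1 ++ [(PySem.List.pyGet? lst i).getD 0], i + 1)))

def sublists_alt (lst : List Int) (min_elmts : Int) (max_elmts : Option Int) : List (List Int) :=
  let mx : Int := max_elmts.getD (lst.length : Int)
  (PySem.List.pyRange min_elmts (mx + 1) 1).flatMap (fun k =>
    -- 'if not level: break' — once level is empty no later round changes it, so the
    -- early exit is the fold that keeps an empty level unchanged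
    ((PySem.List.pyRange k 0 (-1)).foldl
      (fun lv r => if lv = [] then lv else pvLevelStep lst lv r) [([], 0)]).map Prod.fst)

-- ===== PRECONDITION & SPEC =====
-- Pre_ excludes exactly the inputs where range(min_elmts, max_elmts+1) contains a negative
-- length, on which A raises ValueError ("r must be non-negative").
def Pre_sublists (lst : List Int) (min_elmts : Int) (max_elmts : Option Int) : Prop :=
  0 ≤ min_elmts ∨ (max_elmts.getD (lst.length : Int)) + 1 ≤ min_elmts
instance (lst : List Int) (min_elmts : Int) (max_elmts : Option Int) : Decidable (Pre_sublists lst min_elmts max_elmts) := by unfold Pre_sublists; infer_instance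
def pvWitness_sublists : List Int × Int × Option Int := ([1, 2, 3], 1, some 2)

def Spec_sublists (lst : List Int) (min_elmts : Int) (max_elmts : Option Int) (out : List (List Int)) : Prop := out = sublists_alt lst min_elmts max_elmts
instance (lst : List Int) (min_elmts : Int) (max_elmts : Option Int) (out : List (List Int)) : Decidable (Spec_sublists lst min_elmts max_elmts out) := by unfold Spec_sublists; infer_instance

-- ===== CLAIM (what is proved, stated in full; the proofs are below) =====
def Claim_equal_sublists : Prop := ∀ (lst : List Int) (min_elmts : Int) (max_elmts : Option Int), Dom_sublists lst min_elmts max_elmts → Pre_sublists lst min_elmts max_elmts → Spec_sublists lst min_elmts max_elmts (sublists lst min_elmts max_elmts)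

-- ===== LEMMAS AND PROOFS =====

theorem pvCombinations_eq_nil (xs : List Int) (r : Nat) (h : xs.length < r) :
    pvCombinations xs r = [] := by
  induction xs generalizing r with
  | nil => cases r with
    | zero => simp at h
    | succ k => rfl
  | cons x xs ih =>
    cases r with
    | zero => simp at h
    | succ k =>
      simp only [pvCombinations]
      rw [ih k (by simp at h; omega), ih (k + 1) (by simp at h; omega)]
      simp

theorem pvBridge (lst : List Int) (m : Nat) :
    ∀ (s : Int), 0 ≤ s →
      (PySem.List.pyRange s ((lst.length : Int) - m) 1).flatMap
          (fun i => (pvCombinations (lst.drop (i + 1).toNat) m).map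
            ((PySem.List.pyGet? lst i).getD 0 :: ·))
        = pvCombinations (lst.drop s.toNat) (m + 1) := by
  intro s hs
  by_cases hlt : s < (lst.length : Int) - m
  · -- s is a valid start: peel off index s and recurse on s+1
    have hslen : s.toNat < lst.length := by omega
    rw [PySem.List.pyRange_one_cons hlt]
    simp only [List.flatMap_cons]
    have hrec := pvBridge lst m (s + 1) (by omega)
    rw [hrec]
    have hget : (PySem.List.pyGet? lst s).getD 0 = lst[s.toNat] := by
      have hsl : s < (lst.length : Int) := by omega
      have h2 : PySem.List.pyGet? lst s = some lst[s.toNat] := by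
        simp [PySem.List.pyGet?, PySem.List.pyIdx?, hs, hsl]
      rw [h2]; rfl
    have hdrop : lst.drop s.toNat = lst[s.toNat] :: lst.drop (s.toNat + 1) :=
      List.drop_eq_getElem_cons hslen
    have hsucc : (s + 1).toNat = s.toNat + 1 := by omega
    rw [hdrop, hget, hsucc]
    rfl
  · -- empty index range: fewer than m+1 elements remain from position s
    rw [PySem.List.pyRange_one_eq_nil (by omega)]
    have hlen : (lst.drop s.toNat).length < m + 1 := by
      rw [List.length_drop]; omega
    rw [pvCombinations_eq_nil _ _ hlen]
    rfl
termination_by s _ => lst.length - s.toNat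
decreasing_by omega

theorem pvLevels (lst : List Int) (m : Nat) :
    ∀ (L : List (List Int × Int)), (∀ ps ∈ L, 0 ≤ ps.2) →
      ((PySem.List.pyRange (m : Int) 0 (-1)).foldl (pvLevelStep lst) L).map Prod.fst
        = L.flatMap (fun ps =>
            (pvCombinations (lst.drop ps.2.toNat) m).map (ps.1 ++ ·)) := by
  induction m with
  | zero =>
    intro L _
    rw [PySem.List.pyRange_neg_one_eq_nil (by omega)]
    simp [pvCombinations, ← List.map_eq_flatMap]
  | succ m ih =>
    intro L hL
    have hcons : PySem.List.pyRange ((m + 1 : Nat) : Int) 0 (-1)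
        = ((m + 1 : Nat) : Int) :: PySem.List.pyRange (((m + 1 : Nat) : Int) - 1) 0 (-1) :=
      PySem.List.pyRange_neg_one_cons (by omega)
    have hcast : ((m + 1 : Nat) : Int) - 1 = (m : Int) := by omega
    rw [hcons, hcast, List.foldl_cons]
    rw [ih (pvLevelStep lst L ((m + 1 : Nat) : Int)) ?nonneg]
    case nonneg =>
      intro ps hps
      simp only [pvLevelStep, List.mem_flatMap, List.mem_map] at hps
      obtain ⟨qs, hq, i, hi, rfl⟩ := hps
      have := (PySem.List.mem_pyRange_one.mp hi).1
      have := hL qs hq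
      simp; omega
    simp only [pvLevelStep, List.flatMap_assoc, List.flatMap_map]
    apply List.flatMap_congr
    intro ps hps
    have hs : 0 ≤ ps.2 := hL ps hps
    have hb := pvBridge lst m ps.2 hs
    have hn : (lst.length : Int) - ((m + 1 : Nat) : Int) + 1 = (lst.length : Int) - m := by
      push_cast; ring
    rw [hn]
    rw [← hb]
    rw [List.map_flatMap]
    apply List.flatMap_congr
    intro i hi
    have hi0 : 0 ≤ i := le_trans hs (PySem.List.mem_pyRange_one.mp hi).1
    have hfun : (fun x => (ps.1 ++ [(PySem.List.pyGet? lst i).getD 0]) ++ x)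
        = (fun x : List Int => ps.1 ++ ((PySem.List.pyGet? lst i).getD 0 :: x)) := by
      funext x; simp
    simp only [List.map_map, Function.comp_def, hfun]

theorem pvStep_if (lst : List Int) :
    (fun (lv : List (List Int × Int)) (r : Int) => if lv = [] then lv else pvLevelStep lst lv r)
      = pvLevelStep lst := by
  funext lv r
  by_cases h : lv = []
  · subst h; rfl
  · simp [h]

theorem pvKey (lst : List Int) (mn mx : Int) (h : 0 ≤ mn ∨ mx + 1 ≤ mn) :
    (PySem.List.pyRange mn (mx + 1) 1).flatMap (fun k => pvCombinations lst k.toNat) =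
      (PySem.List.pyRange mn (mx + 1) 1).flatMap (fun k =>
        ((PySem.List.pyRange k 0 (-1)).foldl
          (fun lv r => if lv = [] then lv else pvLevelStep lst lv r) [([], 0)]).map Prod.fst) := by
  rw [pvStep_if]
  rcases h with h | h
  · apply List.flatMap_congr
    intro k hk
    have hk0 : 0 ≤ k := le_trans h (PySem.List.mem_pyRange_one.mp hk).1
    have hcast : ((k.toNat : Nat) : Int) = k := by omega
    have := pvLevels lst k.toNat [([], 0)] (by simp)
    rw [hcast] at this
    rw [this]
    simp
  · rw [PySem.List.pyRange_one_eq_nil (by omega)]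
    rfl

theorem sublists_spec : Claim_equal_sublists := by
  intro lst min_elmts max_elmts _ hpre
  exact pvKey lst min_elmts (max_elmts.getD (lst.length : Int)) hpre
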